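-- pv_equiv track=rewrite | github.com/chrishop/tap-hack | generate_requests.py | generate_batch_queue
-- ===== SOURCE A (Python) =====
-- def generate_batch_queue(the_min, the_max, batch_size):
--     queue = [[the_min, the_min]]
--     batch_min = the_min
--     batch_max = the_min
--
--     iterations = int((the_max - the_min) / batch_size)
--     for i in range(iterations):
--         batch_min = batch_max
--         batch_max = batch_max + batch_size
--         queue.append([batch_min, batch_max])
--
--     remainder = (the_max - the_min) % batch_size
--     if remainder != 0:
--         queue.append([batch_max, batch_max + remainder])
--     return queue
-- ===== SOURCE B (Python) =====
-- def generate_batch_queue(the_min, the_max, batch_size):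
--     diff = the_max - the_min
--     n = max(0, diff // batch_size)
--     bounds = [the_min + i * batch_size for i in range(n + 1)]
--     r = diff % batch_size
--     if r:
--         bounds.append(bounds[-1] + r)
--     return [[the_min, the_min]] + [[a, b] for a, b in zip(bounds, bounds[1:])]
-- ===== Notes on version B (the rewrite author's own statement) =====
-- stated objective: alternative
-- what changed: B first builds the boundary list in closed form (the_min + i*batch_size for i in range(n+1) with n = max(0, diff//batch_size), plus the remainder endpoint), then forms the pairs by zipping adjacent boundaries, instead of A's single fused loop that advances batch_min/batch_max and appends as it goes.
-- outside the precondition, e.g. on generate_batch_queue(0, 10, 0): A raises ZeroDivisionError, B raises ZeroDivisionError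
import Mathlib
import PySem

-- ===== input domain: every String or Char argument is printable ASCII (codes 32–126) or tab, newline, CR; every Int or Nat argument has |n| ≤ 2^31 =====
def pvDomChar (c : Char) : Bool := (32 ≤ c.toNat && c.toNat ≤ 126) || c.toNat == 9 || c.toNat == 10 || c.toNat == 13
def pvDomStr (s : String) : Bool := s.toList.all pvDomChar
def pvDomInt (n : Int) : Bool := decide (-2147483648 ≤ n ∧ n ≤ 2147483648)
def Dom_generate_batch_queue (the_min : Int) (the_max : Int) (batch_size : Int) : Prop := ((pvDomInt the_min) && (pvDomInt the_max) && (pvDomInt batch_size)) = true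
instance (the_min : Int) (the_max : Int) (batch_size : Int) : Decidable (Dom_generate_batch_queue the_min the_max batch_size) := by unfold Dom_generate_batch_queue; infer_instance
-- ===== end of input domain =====

-- B decouples boundary generation (a closed-form comprehension over range(n+1)) from pair
-- construction (zip of adjacent boundaries), replacing A's fused advance-and-append loop;
-- objective: alternative.


-- ===== PORT A =====
-- int((the_max - the_min)/batch_size) is Python float division followed by int() truncation;
-- on Dom (|the_max - the_min| ≤ 2^32 ≪ 2^53) the float quotient never rounds across an integer
-- boundary, so it equals truncate-toward-zero integer division, Int.tdiv (exact on Dom).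
def generate_batch_queue (the_min : Int) (the_max : Int) (batch_size : Int) : List (List Int) :=
  let queue : List (List Int) := [[the_min, the_min]]
  let batch_min := the_min
  let batch_max := the_min
  let iterations := Int.tdiv (the_max - the_min) batch_size
  let st := (PySem.List.pyRange 0 iterations 1).foldl
    (fun (st : Int × Int × List (List Int)) _ =>
      (st.2.1, st.2.1 + batch_size, st.2.2 ++ [[st.2.1, st.2.1 + batch_size]]))
    (batch_min, batch_max, queue)
  let remainder := PySem.Int.mod (the_max - the_min) batch_size
  if remainder ≠ 0 then st.2.2 ++ [[st.2.1, st.2.1 + remainder]] else st.2.2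

-- ===== PORT B =====
-- bounds[-1] is ported as getLast! (exact here: bounds is nonempty, it is range(n+1) with n ≥ 0).
def generate_batch_queue_alt (the_min : Int) (the_max : Int) (batch_size : Int) : List (List Int) :=
  let diff := the_max - the_min
  let n := max 0 (PySem.Int.floordiv diff batch_size)
  let bounds := (PySem.List.pyRange 0 (n + 1) 1).map (fun i => the_min + i * batch_size)
  let r := PySem.Int.mod diff batch_size
  let bounds2 := if r ≠ 0 then bounds ++ [bounds.getLast! + r] else bounds
  [[the_min, the_min]] ++ (bounds2.zip bounds2.tail).map (fun p => [p.1, p.2])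

-- ===== PRECONDITION & SPEC =====
-- Python A raises ZeroDivisionError when batch_size = 0; excluded (B raises there too).
def Pre_generate_batch_queue (the_min : Int) (the_max : Int) (batch_size : Int) : Prop :=
  batch_size ≠ 0
instance (the_min : Int) (the_max : Int) (batch_size : Int) : Decidable (Pre_generate_batch_queue the_min the_max batch_size) := by unfold Pre_generate_batch_queue; infer_instance
def pvWitness_generate_batch_queue : Int × Int × Int := (0, 10, 3)

def Spec_generate_batch_queue (the_min : Int) (the_max : Int) (batch_size : Int) (out : List (List Int)) : Prop := out = generate_batch_queue_alt the_min the_max batch_size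
instance (the_min : Int) (the_max : Int) (batch_size : Int) (out : List (List Int)) : Decidable (Spec_generate_batch_queue the_min the_max batch_size out) := by unfold Spec_generate_batch_queue; infer_instance

-- ===== CLAIM (what is proved, stated in full; the proofs are below) =====
def Claim_equal_generate_batch_queue : Prop := ∀ (the_min : Int) (the_max : Int) (batch_size : Int), Dom_generate_batch_queue the_min the_max batch_size → Pre_generate_batch_queue the_min the_max batch_size → Spec_generate_batch_queue the_min the_max batch_size (generate_batch_queue the_min the_max batch_size)

-- ===== LEMMAS AND PROOFS =====

-- truncation-toward-zero division expressed via an adjustment of floor division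
lemma trunc_of_floordiv (d b : Int) (hb : b ≠ 0) :
    (if PySem.Int.floordiv d b < 0 ∧ PySem.Int.floordiv d b * b ≠ d
     then PySem.Int.floordiv d b + 1 else PySem.Int.floordiv d b) = Int.tdiv d b := by
  simp only [PySem.Int.floordiv]
  rw [Int.fdiv_eq_ediv, Int.tdiv_eq_ediv]
  have hd0 : b * (d / b) + d % b = d := Int.mul_ediv_add_emod d b
  have hr0 : 0 ≤ d % b := Int.emod_nonneg d hb
  have hr1 : d % b < |b| := by rw [Int.abs_eq_natAbs]; exact Int.emod_lt d hb
  have hdvd : b ∣ d ↔ d % b = 0 := Int.dvd_iff_emod_eq_zero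
  set e := d / b with he
  set r := d % b with hr
  have hcomm : e * b = b * e := mul_comm e b
  by_cases hrz : r = 0
  · have hd : b ∣ d := hdvd.mpr hrz
    have hmul : e * b = d := by omega
    simp [hd, hmul]
  · have hnd : ¬ b ∣ d := fun h => hrz (hdvd.mp h)
    rcases lt_trichotomy b 0 with hbneg | hbz | hbpos
    · have habs : |b| = -b := abs_of_neg hbneg
      by_cases hds : 0 ≤ d
      · have he0 : e ≤ 0 := by nlinarith
        have hex : (e - 1) * b = e * b - b := by ring
        simp only [if_neg (by omega : ¬(0 ≤ b ∨ b ∣ d)), if_pos (Or.inl hds)]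
        rw [if_pos ⟨by omega, by omega⟩]
        ring
      · have he1 : 1 ≤ e := by nlinarith
        simp only [if_neg (by omega : ¬(0 ≤ b ∨ b ∣ d)),
          if_neg (by omega : ¬(0 ≤ d ∨ b ∣ d))]
        rw [if_neg (by omega)]
        have : b.sign = -1 := Int.sign_eq_neg_one_of_neg hbneg
        omega
    · exact absurd hbz hb
    · have habs : |b| = b := abs_of_pos hbpos
      by_cases hds : 0 ≤ d
      · have he0 : 0 ≤ e := by nlinarith
        simp only [if_pos (Or.inl (le_of_lt hbpos)), if_pos (Or.inl hds), sub_zero]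
        rw [if_neg (by omega)]; omega
      · have he0 : e < 0 := by nlinarith
        simp only [if_pos (Or.inl (le_of_lt hbpos)),
          if_neg (by omega : ¬(0 ≤ d ∨ b ∣ d)), sub_zero]
        rw [if_pos ⟨by omega, by omega⟩]
        have : b.sign = 1 := Int.sign_eq_one_of_pos hbpos
        omega

-- floor and truncation agree after clamping at zero (they differ only on negative quotients)
lemma max_floordiv_eq_max_tdiv (d b : Int) (hb : b ≠ 0) :
    max 0 (PySem.Int.floordiv d b) = max 0 (Int.tdiv d b) := by
  rw [← trunc_of_floordiv d b hb]
  split_ifs with h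
  · omega
  · rfl

-- A's loop: after k iterations batch_max = m + k*b and queue holds the k consecutive pairs
lemma loopA (m b : Int) (k : Nat) :
    ∃ bm, ((List.range k).foldl
      (fun (st : Int × Int × List (List Int)) _ =>
        (st.2.1, st.2.1 + b, st.2.2 ++ [[st.2.1, st.2.1 + b]]))
      (m, m, [[m, m]]))
      = (bm, m + (k : Int) * b,
         [[m, m]] ++ (List.range k).map
           (fun i : Nat => [m + (i : Int) * b, m + ((i : Int) + 1) * b])) := by
  induction k with
  | zero => exact ⟨m, by simp⟩
  | succ k ih =>
    obtain ⟨bm, ih⟩ := ih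
    refine ⟨m + (k : Int) * b, ?_⟩
    rw [List.range_succ, List.foldl_append, ih]
    simp only [List.foldl_cons, List.foldl_nil, List.map_append, List.map_cons, List.map_nil,
      List.append_assoc, Prod.mk.injEq]
    refine ⟨trivial, by push_cast; ring, ?_⟩
    congr 3
    ring_nf

-- adjacent-pair zip of l ++ [x]
lemma zip_tail_append {α β : Type} (f : α × α → β) (l : List α) (x : α) (h : l ≠ []) :
    ((l ++ [x]).zip (l ++ [x]).tail).map f
      = (l.zip l.tail).map f ++ [f (l.getLast h, x)] := by
  induction l with
  | nil => exact absurd rfl h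
  | cons a t ih =>
    cases t with
    | nil => simp
    | cons a2 t2 =>
      simp only [List.cons_append, List.tail_cons, List.zip_cons_cons, List.map_cons]
      have h2 := ih (by simp)
      simp only [List.cons_append, List.tail_cons] at h2
      rw [h2]
      simp [List.getLast_cons]

-- adjacent-pair zip of a (k+1)-point boundary list
lemma zip_tail_range {α β : Type} (f : α × α → β) (g : Nat → α) (k : Nat) :
    ((((List.range (k + 1)).map g).zip ((List.range (k + 1)).map g).tail).map f)
      = (List.range k).map (fun i => f (g i, g (i + 1))) := by
  induction k with
  | zero => simp
  | succ k ih =>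
    rw [List.range_succ (n := k + 1), List.map_append]
    simp only [List.map_cons, List.map_nil]
    rw [zip_tail_append f ((List.range (k + 1)).map g) (g (k + 1)) (by simp), ih]
    conv_rhs => rw [List.range_succ]
    simp [List.getLast_eq_getElem]

lemma main_eq (m M b : Int) (hb : b ≠ 0) :
    generate_batch_queue m M b = generate_batch_queue_alt m M b := by
  simp only [generate_batch_queue, generate_batch_queue_alt]
  set N := Int.tdiv (M - m) b with hN
  set k := N.toNat with hk
  have hmax : max 0 (PySem.Int.floordiv (M - m) b) = (k : Int) := by
    rw [max_floordiv_eq_max_tdiv (M - m) b hb, ← hN]; omega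
  rw [hmax]
  rw [PySem.List.pyRange_one 0 N, PySem.List.pyRange_one 0 ((k : Int) + 1)]
  have h1 : (N - 0).toNat = k := by omega
  have h2 : ((k : Int) + 1 - 0).toNat = k + 1 := by omega
  rw [h1, h2, List.foldl_map, List.map_map]
  obtain ⟨bm, hA⟩ := loopA m b k
  rw [hA]
  by_cases hr : PySem.Int.mod (M - m) b = 0
  · simp only [hr, ne_eq, not_true_eq_false, if_false]
    rw [zip_tail_range (fun p => [p.1, p.2]) ((fun i => m + i * b) ∘ fun j => 0 + (j : Int)) k]
    simp only [Function.comp]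
    congr 1
    apply List.map_congr_left
    intro i _
    push_cast
    ring_nf
  · simp only [ne_eq, hr, not_false_iff, if_true]
    have hlast : (List.map ((fun i => m + i * b) ∘ fun j => (0 : Int) + (j : Nat))
        (List.range (k + 1))).getLast! = m + (k : Int) * b := by
      conv_lhs => rw [List.range_succ]
      simp
    rw [hlast,
      zip_tail_append (fun p => [p.1, p.2]) _ _ (by simp),
      zip_tail_range (fun p => [p.1, p.2]) ((fun i => m + i * b) ∘ fun j => 0 + (j : Int)) k]
    simp only [Function.comp, List.getLast_eq_getElem]
    simp only [List.length_map, List.length_range, List.getElem_map, List.getElem_range]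
    rw [← List.append_assoc]
    congr 2
    · apply List.map_congr_left
      intro i _
      push_cast
      ring_nf
    · congr 2 <;> (push_cast; ring_nf)

-- ===== VERDICT (by name: the statement is the Claim_ definition above) =====
theorem generate_batch_queue_spec : Claim_equal_generate_batch_queue := by
  intro m M b _ hpre
  unfold Spec_generate_batch_queue
  exact main_eq m M b hpre
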